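-- pv_equiv track=rewrite | github.com/projeto-de-algoritmos-2025/Grafos_LeetCode | Exercício 797/LC797.py | allPathsSourceTarget
-- ===== SOURCE A (Python) =====
-- def allPathsSourceTarget(graph):
--     res = []
--     def dfs(node, path):
--         if node == len(graph) - 1:
--             res.append(path[:])
--             return
--         for nei in graph[node]:
--             path.append(nei)
--             dfs(nei, path)
--             path.pop()
--     dfs(0, [0])
--     return res
-- ===== SOURCE B (Python) =====
-- def allPathsSourceTarget(graph):
--     target = len(graph) - 1
--     def solve(node):
--         if node == target:
--             return [[node]]
--         return [[node] + p for nei in graph[node] for p in solve(nei)]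
--     return solve(0)
-- ===== Notes on version B (the rewrite author's own statement) =====
-- stated objective: simpler
-- what changed: Replaced the shared mutable path/result accumulator with append/pop backtracking by a pure recursive function that returns all node-to-target paths and prepends the current node to each suffix path.
import Mathlib
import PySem

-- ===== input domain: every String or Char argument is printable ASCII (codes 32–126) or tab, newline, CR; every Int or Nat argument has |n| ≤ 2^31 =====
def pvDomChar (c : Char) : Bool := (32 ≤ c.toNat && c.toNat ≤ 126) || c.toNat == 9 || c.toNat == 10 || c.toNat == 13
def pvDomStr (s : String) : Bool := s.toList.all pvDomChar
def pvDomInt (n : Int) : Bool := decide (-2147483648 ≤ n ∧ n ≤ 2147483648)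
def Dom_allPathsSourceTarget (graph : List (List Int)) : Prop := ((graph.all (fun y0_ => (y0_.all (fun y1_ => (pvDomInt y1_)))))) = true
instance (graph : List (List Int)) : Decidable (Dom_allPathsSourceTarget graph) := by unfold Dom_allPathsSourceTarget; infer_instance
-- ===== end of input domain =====

-- B replaces A's shared mutable path/result accumulator (append/pop backtracking) with a pure
-- recursion returning all node-to-target paths; objective: simpler. Return-value equivalence only
-- (A mutates only its own locals).


-- ===== PORT A =====
-- A's inner dfs: the mutable `res` / `path` become explicit accumulator arguments
-- (path.append/dfs/path.pop = recursing with path ++ [nei]; res.append(path[:]) = res ++ [path]).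
-- Fuel totalises the recursion; inside Pre_ (no reachable cycle) every DFS path visits distinct
-- node labels, of which there are at most graph.flatten.length + 1, so the fuel below is never
-- exhausted and the port is exact there.
def dfsA (graph : List (List Int)) : Nat → Int → List Int → List (List Int) → List (List Int)
  | 0, _, _, res => res
  | fuel+1, node, path, res =>
    if node = (graph.length : Int) - 1 then res ++ [path]
    else
      match PySem.List.pyGet? graph node with   -- graph[node]; none = IndexError, outside Pre_
      | none => res
      | some neis => neis.foldl (fun r nei => dfsA graph fuel nei (path ++ [nei]) r) res

def allPathsSourceTarget (graph : List (List Int)) : List (List Int) :=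
  dfsA graph (graph.flatten.length + 2) 0 [0] []

-- ===== PORT B =====
-- B's inner solve (target = len(graph)-1 computed once): returns all paths from `node` to the
-- target; the comprehension [[node] + p for nei in graph[node] for p in solve(nei)] is
-- flatMap/map.  graph[node] is pyGet?; `.getD []` stands for the IndexError case (none), which
-- Pre_ excludes.  Same fuel bound as A's port, sufficient inside Pre_ for the same reason.
def solveB (graph : List (List Int)) (target : Int) : Nat → Int → List (List Int)
  | 0, _ => []
  | fuel+1, node =>
    if node = target then [[node]]
    else ((PySem.List.pyGet? graph node).getD []).flatMap
           (fun nei => (solveB graph target fuel nei).map (fun p => node :: p))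

def allPathsSourceTarget_alt (graph : List (List Int)) : List (List Int) :=
  solveB graph ((graph.length : Int) - 1) (graph.flatten.length + 2) 0

-- ===== PRECONDITION & SPEC =====
-- pvSuccs v = the node labels A's dfs would recurse to from label v (Python index semantics:
-- negative labels wrap; the target row is never expanded; an unreadable row contributes nothing
-- here and is caught by the readability conjunct of Pre_ instead).
def pvSuccs (graph : List (List Int)) (v : Int) : List Int :=
  if v = (graph.length : Int) - 1 then [] else (PySem.List.pyGet? graph v).getD []

-- one round of the reachability closure: keep S and add every successor
def pvStep (graph : List (List Int)) (S : List Int) : List Int :=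
  (S ++ S.flatMap (pvSuccs graph)).dedup

-- full closure of the edge relation: at most graph.flatten.length + 1 distinct labels can ever
-- appear, so that many rounds reach the fixpoint.  This is a property of the input graph (which
-- labels the edge relation can reach), not a copy of either port's path-building recursion.
def pvClosure (graph : List (List Int)) (S : List Int) : List Int :=
  (pvStep graph)^[graph.flatten.length + 1] S

-- Pre_ excludes exactly the inputs on which A does not return: the empty graph (graph[0] raises
-- IndexError), graphs whose DFS from node 0 reads an out-of-range row (IndexError), and graphs
-- with a cycle reachable from 0 (unbounded recursion, RecursionError).
def Pre_allPathsSourceTarget (graph : List (List Int)) : Prop :=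
  graph ≠ [] ∧
  ∀ v ∈ pvClosure graph [0],
    (v = (graph.length : Int) - 1 ∨ (PySem.List.pyGet? graph v).isSome = true) ∧
    v ∉ pvClosure graph (pvSuccs graph v)

instance (graph : List (List Int)) : Decidable (Pre_allPathsSourceTarget graph) := by
  unfold Pre_allPathsSourceTarget; infer_instance

def pvWitness_allPathsSourceTarget : List (List Int) := [[1, 2], [3], [3], []]

def Spec_allPathsSourceTarget (graph : List (List Int)) (out : List (List Int)) : Prop := out = allPathsSourceTarget_alt graph
instance (graph : List (List Int)) (out : List (List Int)) : Decidable (Spec_allPathsSourceTarget graph out) := by unfold Spec_allPathsSourceTarget; infer_instance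

-- ===== CLAIM (what is proved, stated in full; the proofs are below) =====
def Claim_equal_allPathsSourceTarget : Prop := ∀ (graph : List (List Int)), Dom_allPathsSourceTarget graph → Pre_allPathsSourceTarget graph → Spec_allPathsSourceTarget graph (allPathsSourceTarget graph)

-- ===== LEMMAS AND PROOFS =====

-- every path returned by solveB starts with its start node
theorem solveB_head (graph : List (List Int)) (target : Int) :
    ∀ (fuel : Nat) (node : Int) (q : List Int),
      q ∈ solveB graph target fuel node → ∃ r, q = node :: r := by
  intro fuel
  induction fuel with
  | zero => intro node q h; simp [solveB] at h
  | succ fuel ih =>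
    intro node q h
    simp only [solveB] at h
    split at h
    · simp at h; exact ⟨[], by simp [h]⟩
    · simp only [List.mem_flatMap, List.mem_map] at h
      obtain ⟨nei, _, p, _, hq⟩ := h
      exact ⟨p, hq.symm⟩

-- the accumulator invariant connecting A's dfs with B's solve
theorem dfsA_eq_solveB (graph : List (List Int)) :
    ∀ (fuel : Nat) (node : Int) (path : List Int) (res : List (List Int)),
      dfsA graph fuel node path res =
        res ++ (solveB graph ((graph.length : Int) - 1) fuel node).map (fun q => path ++ q.tail) := by
  intro fuel
  induction fuel with
  | zero => intro node path res; simp [dfsA, solveB]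
  | succ fuel ih =>
    intro node path res
    simp only [dfsA, solveB]
    split
    · simp
    · cases hg : PySem.List.pyGet? graph node with
      | none => simp
      | some neis =>
        simp only [Option.getD_some]
        clear hg
        -- fold over neighbours, with the IH rewriting each step
        induction neis generalizing res with
        | nil => simp
        | cons nei rest ihrest =>
          simp only [List.foldl_cons, List.flatMap_cons, List.map_append, List.map_map]
          rw [ih nei (path ++ [nei]) res, ihrest, List.append_assoc]
          congr 2
          apply List.map_congr_left
          intro q hq
          obtain ⟨r, rfl⟩ := solveB_head graph _ fuel nei q hq
          simp

theorem A_eq_B (graph : List (List Int)) :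
    allPathsSourceTarget graph = allPathsSourceTarget_alt graph := by
  unfold allPathsSourceTarget allPathsSourceTarget_alt
  rw [dfsA_eq_solveB]
  simp only [List.nil_append]
  conv_rhs => rw [← List.map_id (solveB graph ((graph.length : Int) - 1) (graph.flatten.length + 2) 0)]
  apply List.map_congr_left
  intro q hq
  obtain ⟨r, rfl⟩ := solveB_head graph _ (graph.flatten.length + 2) 0 q hq
  simp

-- ===== VERDICT (by name: the statement is the Claim_ definition above) =====
theorem allPathsSourceTarget_spec : Claim_equal_allPathsSourceTarget := by
  intro graph _ _
  unfold Spec_allPathsSourceTarget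
  exact A_eq_B graph
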